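-- pv_equiv track=rewrite | github.com/brson/tigerbeetle | compaction-plot.py | drop_high_writes
-- ===== SOURCE A (Python) =====
-- import math
--
-- def build_views(data):
--     seeds = {}
--     for row in data:
--         if not row[0] in seeds:
--             seeds[row[0]] = []
--         seed = seeds[row[0]]
--         seed += [row]
--
--     configs = {}
--     for row in data:
--         if not row[1] in configs:
--             configs[row[1]] = []
--         config = configs[row[1]]
--         config += [row]
--
--     return seeds, configs
--
-- def drop_high_writes(data):
--     seeds, configs = build_views(data)
--     blocks_created_summed = []
--
--     for config in configs.values():
--         blocks_created_total = 0
--         for row in config: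
--             blocks_created_total += row[2]
--         blocks_created_summed += [(blocks_created_total, config)]
--
--     blocks_created_summed.sort(
--         key = lambda x: x[0],
--     )
--
--     blocks_created_summed = blocks_created_summed[:math.floor(len(blocks_created_summed)/2)]
--
--     new = []
--     for _, row in blocks_created_summed:
--         new += row
--
--     return new
-- ===== SOURCE B (Python) =====
-- import math
--
-- def drop_high_writes(data):
--     # Tally per-config block totals in one pass (no row grouping at all),
--     # rank the configs by total (stable: first-appearance order on ties),
--     # then emit the rows of each kept config by filtering the input.
--     sums = {}
--     for row in data:
--         sums[row[1]] = sums.get(row[1], 0) + row[2]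
--     ranked = sorted(sums, key=sums.get)
--     out = []
--     for config in ranked[:math.floor(len(ranked) / 2)]:
--         out.extend(row for row in data if row[1] == config)
--     return out
-- ===== Notes on version B (the rewrite author's own statement) =====
-- stated objective: alternative
-- what changed: B never groups rows at all: it keeps only a per-config running total in one pass, ranks the config keys by total with a stable sort, and rebuilds the output by filtering the input once per kept config, whereas A builds per-config row lists (plus an unused seeds grouping), re-scans each group to sum it, sorts (sum, group) pairs and flattens the kept groups.
import Mathlib
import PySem

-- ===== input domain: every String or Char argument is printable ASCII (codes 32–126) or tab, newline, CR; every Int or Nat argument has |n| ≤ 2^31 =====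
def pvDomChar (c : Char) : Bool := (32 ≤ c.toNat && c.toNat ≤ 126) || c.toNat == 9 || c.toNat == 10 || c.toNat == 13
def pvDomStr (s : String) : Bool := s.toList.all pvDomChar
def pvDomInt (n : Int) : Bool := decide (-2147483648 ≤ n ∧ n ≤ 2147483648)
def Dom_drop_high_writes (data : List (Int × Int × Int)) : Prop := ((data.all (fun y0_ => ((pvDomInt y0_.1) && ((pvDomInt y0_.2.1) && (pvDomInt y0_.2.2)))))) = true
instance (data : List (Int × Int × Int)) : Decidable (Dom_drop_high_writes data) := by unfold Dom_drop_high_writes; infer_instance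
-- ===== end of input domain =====

-- B never builds row groups: it tallies per-config block totals in one pass, ranks the
-- config keys by total, and emits the kept configs' rows by filtering the input; objective: alternative.

-- ===== PORT A =====
-- build_views: two grouping loops; 'config += [row]' mutates the dict's list in place,
-- so each loop step is: insert [] if the key is fresh, then overwrite with old ++ [row].
def pvBuildView (key : Int × Int × Int → Int) (data : List (Int × Int × Int)) :
    PySem.Dict Int (List (Int × Int × Int)) :=
  data.foldl (fun d row =>
    let d := if d.contains (key row) then d else d.insert (key row) []
    d.insert (key row) (d.getD (key row) [] ++ [row])) PySem.Dict.empty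

def drop_high_writes (data : List (Int × Int × Int)) : List (Int × Int × Int) :=
  let _seeds := pvBuildView (fun row => row.1) data      -- computed and unused, as in A
  let configs := pvBuildView (fun row => row.2.1) data
  let blocksCreatedSummed := configs.values.foldl (fun acc config =>
    acc ++ [(config.foldl (fun t row => t + row.2.2) 0, config)]) []
  let sortedSummed := PySem.List.sorted blocksCreatedSummed (fun x => x.1) false
  -- math.floor(len(..)/2) = len(..) // 2 (the length is a nonnegative int)
  let kept := PySem.List.slice sortedSummed none
    (some (PySem.Int.floordiv (PySem.List.len sortedSummed) 2))
  kept.foldl (fun acc p => acc ++ p.2) []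

-- ===== PORT B =====
def drop_high_writes_alt (data : List (Int × Int × Int)) : List (Int × Int × Int) :=
  let sums := data.foldl (fun d row =>
    d.insert row.2.1 (d.getD row.2.1 0 + row.2.2)) (PySem.Dict.empty : PySem.Dict Int Int)
  -- key=sums.get: every sorted element is a key of sums, so sums.get k is its value (getD exact here)
  let ranked := PySem.List.sorted sums.keys (fun k => sums.getD k 0) false
  let kept := PySem.List.slice ranked none
    (some (PySem.Int.floordiv (PySem.List.len ranked) 2))
  kept.foldl (fun acc config => acc ++ data.filter (fun row => row.2.1 == config)) []

-- ===== PRECONDITION & SPEC =====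
def Spec_drop_high_writes (data : List (Int × Int × Int)) (out : List (Int × Int × Int)) : Prop := out = drop_high_writes_alt data
instance (data : List (Int × Int × Int)) (out : List (Int × Int × Int)) : Decidable (Spec_drop_high_writes data out) := by unfold Spec_drop_high_writes; infer_instance

-- ===== CLAIM (what is proved, stated in full; the proofs are below) =====
def Claim_equal_drop_high_writes : Prop := ∀ (data : List (Int × Int × Int)), Dom_drop_high_writes data → Spec_drop_high_writes data (drop_high_writes data)

-- ===== LEMMAS AND PROOFS =====

-- the rows of config c, and their blocks total
def pvFlt (data : List (Int × Int × Int)) (c : Int) : List (Int × Int × Int) :=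
  data.filter (fun row => row.2.1 == c)
def pvTot (data : List (Int × Int × Int)) (c : Int) : Int :=
  ((pvFlt data c).map (fun row => row.2.2)).sum

-- A's grouping step (insert [] if fresh, then overwrite with old ++ [row]) IS Dict.modify
lemma pv_stepA_eq_modify (d : PySem.Dict Int (List (Int × Int × Int))) (k : Int)
    (row : Int × Int × Int) :
    (let d' := if d.contains k then d else d.insert k []
     d'.insert k (d'.getD k [] ++ [row])) = d.modify k [] (fun g => g ++ [row]) := by
  cases h : d.contains k with
  | true => simp [PySem.Dict.modify]
  | false =>
    simp only [Bool.false_eq_true, if_false]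
    rw [PySem.Dict.getD_insert_self, PySem.Dict.insert_insert_self, PySem.Dict.modify,
      PySem.Dict.getD_of_not_contains d _ h]

-- A's configs dict, rewritten as the modify fold
lemma pv_configs_eq (data : List (Int × Int × Int)) :
    pvBuildView (fun row => row.2.1) data =
    data.foldl (fun d row => d.modify row.2.1 [] (fun g => g ++ [row])) PySem.Dict.empty := by
  unfold pvBuildView
  congr 1
  funext d row
  exact pv_stepA_eq_modify d row.2.1 row

-- value of the configs dict at c: the rows of config c
lemma pv_configs_getD (data : List (Int × Int × Int)) (c : Int) :
    (data.foldl (fun d row => d.modify row.2.1 [] (fun g => g ++ [row]))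
        PySem.Dict.empty).getD c [] = pvFlt data c := by
  have h := PySem.Dict.getD_foldl_modify_append
    (data.map (fun row => (row.2.1, row))) (PySem.Dict.empty) c
  rw [List.foldl_map] at h
  simp only [PySem.Dict.getD_empty, List.nil_append] at h
  rw [h, pvFlt, List.filter_map]
  simp [Function.comp_def]

-- value of B's sums dict at c: the blocks total of config c
lemma pv_sums_getD (data : List (Int × Int × Int)) (c : Int)
    (d : PySem.Dict Int Int) :
    (data.foldl (fun d row => d.insert row.2.1 (d.getD row.2.1 0 + row.2.2)) d).getD c 0 =
    d.getD c 0 + pvTot data c := by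
  induction data generalizing d with
  | nil => simp [pvTot, pvFlt]
  | cons row rest ih =>
    simp only [List.foldl_cons, ih]
    by_cases hc : c = row.2.1
    · subst hc
      rw [PySem.Dict.getD_insert_self]
      simp [pvTot, pvFlt]
      ring
    · rw [PySem.Dict.getD_insert_of_ne _ _ _ hc]
      simp [pvTot, pvFlt, Ne.symm hc]

-- insertBy commutes with map when the comparison only looks through the map
lemma pv_insertBy_map {α β : Type} (f : α → β) (b : β → β → Bool) (b' : α → α → Bool)
    (h : ∀ a a', b (f a) (f a') = b' a a') (x : α) (l : List α) :
    PySem.List.insertBy b (f x) (l.map f) = (PySem.List.insertBy b' x l).map f := by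
  induction l with
  | nil => simp [PySem.List.insertBy]
  | cons y ys ih =>
    simp only [List.map_cons, PySem.List.insertBy, h]
    by_cases hb : b' x y = true <;> simp [hb, ih]

lemma pv_foldl_insertBy_map {α β : Type} (f : α → β) (b : β → β → Bool) (b' : α → α → Bool)
    (h : ∀ a a', b (f a) (f a') = b' a a') (l m : List α) :
    (l.map f).foldl (fun acc x => PySem.List.insertBy b x acc) (m.map f) =
    (l.foldl (fun acc x => PySem.List.insertBy b' x acc) m).map f := by
  induction l generalizing m with
  | nil => rfl
  | cons x xs ih =>
    simp only [List.map_cons, List.foldl_cons]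
    rw [pv_insertBy_map f b b' h, ih]

-- stable sort commutes with map when the key factors through the map
lemma pv_sorted_map {α β κ : Type} [LT κ] [DecidableLT κ] (f : α → β) (key : β → κ)
    (key' : α → κ) (h : ∀ a, key (f a) = key' a) (l : List α) :
    PySem.List.sorted (l.map f) key false = (PySem.List.sorted l key' false).map f := by
  rw [PySem.List.sorted_eq_foldl_insertBy, PySem.List.sorted_eq_foldl_insertBy]
  have := pv_foldl_insertBy_map f (fun a b => decide (key a < key b))
    (fun a b => decide (key' a < key' b)) (by intro a a'; simp [h]) l []
  simpa using this

-- ===== VERDICT (by name: the statement is the Claim_ definition above) =====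
theorem drop_high_writes_spec : Claim_equal_drop_high_writes := by
  intro data _
  unfold Spec_drop_high_writes drop_high_writes drop_high_writes_alt
  dsimp only
  rw [pv_configs_eq]
  set G := data.foldl (fun d row => d.modify row.2.1 [] (fun g => g ++ [row]))
    PySem.Dict.empty with hG
  set S := data.foldl (fun d row => d.insert row.2.1 (d.getD row.2.1 0 + row.2.2))
    (PySem.Dict.empty : PySem.Dict Int Int) with hS
  -- both dicts carry the same keys: the distinct configs in first-appearance order
  have hGkeys : G.keys = PySem.Set.ofList (data.map (fun row => row.2.1)) := by
    rw [hG, PySem.Dict.keys_foldl_modify_key data (fun row => row.2.1) []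
      (fun _ row => fun g => g ++ [row])]
    rw [show (PySem.Dict.empty : PySem.Dict Int (List (Int × Int × Int))).keys = [] from rfl,
      PySem.Set.update_nil_left]
  have hSkeys : S.keys = PySem.Set.ofList (data.map (fun row => row.2.1)) := by
    rw [hS, PySem.Dict.keys_foldl_insert_key data (fun row => row.2.1)
      (fun d row => d.getD row.2.1 0 + row.2.2)]
    rw [show (PySem.Dict.empty : PySem.Dict Int Int).keys = [] from rfl,
      PySem.Set.update_nil_left]
  have hGnd : G.keys.Nodup := by rw [hGkeys]; exact PySem.Set.nodup_ofList _
  -- A's summed list is the keys mapped to (total, rows)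
  have hvals : G.values = G.keys.map (fun k => G.getD k []) :=
    PySem.Dict.values_eq_map_keys G hGnd []
  have hgetD : ∀ c, G.getD c [] = pvFlt data c := fun c => by
    rw [hG]; exact pv_configs_getD data c
  have hsum : ∀ g : List (Int × Int × Int),
      g.foldl (fun t row => t + row.2.2) 0 = (g.map (fun row => row.2.2)).sum := fun g => by
    rw [PySem.List.foldl_add]; simp
  have hsummed : G.values.foldl (fun acc config =>
      acc ++ [(config.foldl (fun t row => t + row.2.2) 0, config)]) [] =
      G.keys.map (fun k => (pvTot data k, pvFlt data k)) := by
    rw [PySem.List.foldl_append_singleton_eq_map, hvals, List.map_map]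
    simp only [List.nil_append, Function.comp_def, hgetD, hsum, pvTot]
  rw [hsummed]
  -- B's key for sorting is the same total
  have hSgetD : ∀ c, S.getD c 0 = pvTot data c := fun c => by
    rw [hS, pv_sums_getD]; simp
  -- the two sorts coincide through the map k ↦ (total k, rows k)
  have hsorted : PySem.List.sorted
      (G.keys.map (fun k => (pvTot data k, pvFlt data k))) (fun x => x.1) false =
      (PySem.List.sorted S.keys (fun k => S.getD k 0) false).map
        (fun k => (pvTot data k, pvFlt data k)) := by
    rw [hGkeys, ← hSkeys]
    exact pv_sorted_map _ _ _ (fun a => by simp [hSgetD]) S.keys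
  rw [hsorted]
  set R := PySem.List.sorted S.keys (fun k => S.getD k 0) false with hR
  -- equal lengths, hence the same slice bound
  have hlen : (R.map (fun k => (pvTot data k, pvFlt data k))).length = R.length := by
    simp
  -- floor(len/2) is a nonnegative bound; slice = take on both sides
  have hslice : ∀ {α : Type} (xs : List α) (n : Nat),
      PySem.List.slice xs none (some (PySem.Int.floordiv ((n : Int)) 2)) =
      xs.take (n / 2) := by
    intro α xs n
    have : PySem.Int.floordiv ((n : Int)) 2 = ((n / 2 : Nat) : Int) := by
      exact_mod_cast PySem.Int.floordiv_natCast n 2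
    rw [this, PySem.List.slice_to _ (by positivity)]
    congr 1
  rw [PySem.List.foldl_append_eq_flatMap, PySem.List.foldl_append_eq_flatMap]
  simp only [PySem.List.len_eq, hlen]
  rw [hslice _ R.length, hslice _ R.length, ← List.map_take, List.flatMap_map]
  simp only [List.nil_append]
  congr 1
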